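-- pv_equiv track=rewrite | github.com/SMD-Bioinformatics-Lund/coyote3 | coyote/blueprints/variants/util.py | select_csq
-- ===== SOURCE A (Python) =====
-- def select_csq(csq_arr, canonical):
--
--     db_canonical = -1
--     vep_canonical = -1
--     first_protcoding = -1
--
--     impact_order = ["HIGH", "MODERATE", "LOW", "MODIFIER"]
--
--     for impact in impact_order:
--         for csq_idx, csq in enumerate(csq_arr):
--             if csq["IMPACT"] == impact:
--
--                 if csq["SYMBOL"] in canonical and canonical[csq["SYMBOL"]] == refseq_noversion(
--                     csq["Feature"]
--                 ):
--                     db_canonical = csq_idx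
--                     return (csq_arr[db_canonical], "db")
--                 if csq["CANONICAL"] == "YES" and vep_canonical == -1:
--                     vep_canonical = csq_idx
--                 if (
--                     first_protcoding == -1
--                     and csq["BIOTYPE"] == "protein_coding"
--                     and first_protcoding == -1
--                 ):
--                     first_protcoding = csq_idx
--
--     if vep_canonical >= 0:
--         return (csq_arr[vep_canonical], "vep")
--     elif first_protcoding >= 0:
--         return (csq_arr[first_protcoding], "random")
--
--     return (csq_arr[0], "random")
--
-- def refseq_noversion(acc):
--     a = acc.split(".")
--     return a[0]
-- ===== SOURCE B (Python) =====
-- def select_csq(csq_arr, canonical):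
--     prio = {"HIGH": 0, "MODERATE": 1, "LOW": 2, "MODIFIER": 3}
--     best_db = best_vep = best_prot = None
--     for idx, csq in enumerate(csq_arr):
--         p = prio.get(csq["IMPACT"])
--         if p is None:
--             continue
--         key = (p, idx)
--         if csq["SYMBOL"] in canonical and canonical[csq["SYMBOL"]] == csq["Feature"].split(".")[0]:
--             if best_db is None or key < best_db:
--                 best_db = key
--         if csq["CANONICAL"] == "YES":
--             if best_vep is None or key < best_vep:
--                 best_vep = key
--         if csq["BIOTYPE"] == "protein_coding":
--             if best_prot is None or key < best_prot:
--                 best_prot = key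
--     if best_db is not None:
--         return (csq_arr[best_db[1]], "db")
--     if best_vep is not None:
--         return (csq_arr[best_vep[1]], "vep")
--     if best_prot is not None:
--         return (csq_arr[best_prot[1]], "random")
--     return (csq_arr[0], "random")
-- ===== Notes on version B (the rewrite author's own statement) =====
-- stated objective: simpler
-- what changed: Replaces A's four passes over csq_arr (one per impact level, with early return and leftover -1 sentinel state) by a single enumerate pass that keeps, per category (db/vep/protein_coding), the minimal (impact-priority, index) key, then dispatches once.
import Mathlib
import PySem

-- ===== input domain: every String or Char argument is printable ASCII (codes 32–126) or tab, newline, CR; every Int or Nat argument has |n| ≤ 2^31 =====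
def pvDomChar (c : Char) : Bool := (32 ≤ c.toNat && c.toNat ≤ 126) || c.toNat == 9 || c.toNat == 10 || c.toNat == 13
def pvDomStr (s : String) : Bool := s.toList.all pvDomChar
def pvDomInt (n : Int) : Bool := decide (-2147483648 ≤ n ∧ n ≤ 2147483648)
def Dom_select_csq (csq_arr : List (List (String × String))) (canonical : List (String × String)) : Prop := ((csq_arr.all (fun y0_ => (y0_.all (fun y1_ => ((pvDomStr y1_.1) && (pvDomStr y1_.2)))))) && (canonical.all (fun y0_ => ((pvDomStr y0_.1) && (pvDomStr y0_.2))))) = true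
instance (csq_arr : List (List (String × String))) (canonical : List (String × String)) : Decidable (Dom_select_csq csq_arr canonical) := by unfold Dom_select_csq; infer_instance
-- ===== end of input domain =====

-- B replaces A's four passes (one per impact level, early return, -1 sentinels) by one
-- enumerate pass keeping per category the minimal (impact-priority, index) key: simpler.

-- ===== PORT A =====
def refseq_noversion (acc : String) : String :=
  ((PySem.Str.split? acc ".").getD []).headD ""   -- a = acc.split("."); a[0] (split? is some for sep "."; split never empty)

-- csq[k]: KeyError (= get? none) is excluded by Pre_; the "" default is never the value used on admitted inputs
def pvA_get (csq : List (String × String)) (k : String) : String :=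
  PySem.Dict.getD (PySem.Dict.mk csq) k ""

-- inner 'for csq_idx, csq in enumerate(csq_arr)' body for one impact, carrying vep_canonical/first_protcoding
def pvA_scan (canonical : List (String × String)) (impact : String) :
    List (Int × List (String × String)) → Int → Int → Option Int × Int × Int
  | [], vep, prot => (none, vep, prot)
  | (idx, csq) :: rest, vep, prot =>
    if pvA_get csq "IMPACT" == impact then
      if (PySem.Dict.get? (PySem.Dict.mk canonical) (pvA_get csq "SYMBOL")).isSome
          && PySem.Dict.getD (PySem.Dict.mk canonical) (pvA_get csq "SYMBOL") "" == refseq_noversion (pvA_get csq "Feature") then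
        (some idx, vep, prot)      -- db_canonical = csq_idx; return (csq_arr[db_canonical], "db")
      else
        pvA_scan canonical impact rest
          (if pvA_get csq "CANONICAL" == "YES" && vep == -1 then idx else vep)
          (if prot == -1 && pvA_get csq "BIOTYPE" == "protein_coding" && prot == -1 then idx else prot)
    else pvA_scan canonical impact rest vep prot

-- outer 'for impact in impact_order'
def pvA_loop (canonical : List (String × String)) (enumd : List (Int × List (String × String))) :
    List String → Int → Int → Option Int × Int × Int
  | [], vep, prot => (none, vep, prot)
  | impact :: rest, vep, prot =>
    match pvA_scan canonical impact enumd vep prot with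
    | (some i, v, p) => (some i, v, p)
    | (none, v, p) => pvA_loop canonical enumd rest v p

def select_csq (csq_arr : List (List (String × String))) (canonical : List (String × String)) : (List (String × String)) × String :=
  match pvA_loop canonical (PySem.List.enumerate csq_arr) ["HIGH", "MODERATE", "LOW", "MODIFIER"] (-1) (-1) with
  | (some db, _, _) => ((PySem.List.pyGet? csq_arr db).getD [], "db")
  | (none, vep, prot) =>
    if vep ≥ 0 then ((PySem.List.pyGet? csq_arr vep).getD [], "vep")
    else if prot ≥ 0 then ((PySem.List.pyGet? csq_arr prot).getD [], "random")
    else ((PySem.List.pyGet? csq_arr 0).getD [], "random")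

-- ===== PORT B =====
def pvB_get (csq : List (String × String)) (k : String) : String :=
  PySem.Dict.getD (PySem.Dict.mk csq) k ""

-- p = prio.get(csq["IMPACT"])
def pvB_prio (csq : List (String × String)) : Option Int :=
  PySem.Dict.get? (PySem.Dict.mk [("HIGH", (0 : Int)), ("MODERATE", 1), ("LOW", 2), ("MODIFIER", 3)]) (pvB_get csq "IMPACT")

-- Python tuple '<' on (int, int)
def pvB_lt (a b : Int × Int) : Bool := a.1 < b.1 || (a.1 == b.1 && a.2 < b.2)

-- 'if best is None or key < best: best = key'
def pvB_upd (best : Option (Int × Int)) (key : Int × Int) : Option (Int × Int) :=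
  match best with
  | none => some key
  | some b => if pvB_lt key b then some key else some b

def pvB_isdb (canonical : List (String × String)) (csq : List (String × String)) : Bool :=
  match PySem.Dict.get? (PySem.Dict.mk canonical) (pvB_get csq "SYMBOL") with
  | some v => v == ((PySem.Str.split? (pvB_get csq "Feature") ".").getD []).headD ""
  | none => false

def pvB_loop (canonical : List (String × String)) :
    List (Int × List (String × String)) → Option (Int × Int) → Option (Int × Int) → Option (Int × Int) →
    Option (Int × Int) × Option (Int × Int) × Option (Int × Int)
  | [], db, vep, prot => (db, vep, prot)
  | (idx, csq) :: rest, db, vep, prot =>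
    match pvB_prio csq with
    | none => pvB_loop canonical rest db vep prot
    | some p =>
      pvB_loop canonical rest
        (if pvB_isdb canonical csq then pvB_upd db (p, idx) else db)
        (if pvB_get csq "CANONICAL" == "YES" then pvB_upd vep (p, idx) else vep)
        (if pvB_get csq "BIOTYPE" == "protein_coding" then pvB_upd prot (p, idx) else prot)

def select_csq_alt (csq_arr : List (List (String × String))) (canonical : List (String × String)) : (List (String × String)) × String :=
  match pvB_loop canonical (PySem.List.enumerate csq_arr) none none none with
  | (some db, _, _) => ((PySem.List.pyGet? csq_arr db.2).getD [], "db")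
  | (none, some vep, _) => ((PySem.List.pyGet? csq_arr vep.2).getD [], "vep")
  | (none, none, some prot) => ((PySem.List.pyGet? csq_arr prot.2).getD [], "random")
  | (none, none, none) => ((PySem.List.pyGet? csq_arr 0).getD [], "random")

-- ===== PRECONDITION & SPEC =====
-- Pre_ excludes inputs where Python raises: empty csq_arr (IndexError) and entries missing a key the
-- scan reads (KeyError): "IMPACT" always; "SYMBOL"/"CANONICAL"/"BIOTYPE" on entries whose IMPACT is one
-- of the four levels, plus "Feature" when that SYMBOL is in canonical. It is slightly conservative:
-- it requires those keys on EVERY qualifying entry, also where A's early db-return or the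
-- first_protcoding short-circuit happens to skip the access (A returns there, B raises KeyError).
def Pre_select_csq (csq_arr : List (List (String × String))) (canonical : List (String × String)) : Prop :=
  csq_arr ≠ [] ∧ ∀ csq ∈ csq_arr,
    (PySem.Dict.get? (PySem.Dict.mk csq) "IMPACT").isSome = true ∧
    (PySem.Dict.getD (PySem.Dict.mk csq) "IMPACT" "" ∈ (["HIGH", "MODERATE", "LOW", "MODIFIER"] : List String) →
      (PySem.Dict.get? (PySem.Dict.mk csq) "SYMBOL").isSome = true ∧
      (PySem.Dict.get? (PySem.Dict.mk csq) "CANONICAL").isSome = true ∧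
      (PySem.Dict.get? (PySem.Dict.mk csq) "BIOTYPE").isSome = true ∧
      ((PySem.Dict.get? (PySem.Dict.mk canonical) (PySem.Dict.getD (PySem.Dict.mk csq) "SYMBOL" "")).isSome = true →
        (PySem.Dict.get? (PySem.Dict.mk csq) "Feature").isSome = true))
instance (csq_arr : List (List (String × String))) (canonical : List (String × String)) : Decidable (Pre_select_csq csq_arr canonical) := by unfold Pre_select_csq; infer_instance

def pvWitness_select_csq : (List (List (String × String))) × (List (String × String)) :=
  ([[("IMPACT", "HIGH"), ("SYMBOL", "G"), ("Feature", "T.1"), ("CANONICAL", "YES"), ("BIOTYPE", "protein_coding")], [("IMPACT", "other")]], [("G", "T")])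

def Spec_select_csq (csq_arr : List (List (String × String))) (canonical : List (String × String)) (out : (List (String × String)) × String) : Prop := out = select_csq_alt csq_arr canonical
instance (csq_arr : List (List (String × String))) (canonical : List (String × String)) (out : (List (String × String)) × String) : Decidable (Spec_select_csq csq_arr canonical out) := by unfold Spec_select_csq; infer_instance

-- ===== CLAIM (what is proved, stated in full; the proofs are below) =====
def Claim_equal_select_csq : Prop := ∀ (csq_arr : List (List (String × String))) (canonical : List (String × String)), Dom_select_csq csq_arr canonical → Pre_select_csq csq_arr canonical → Spec_select_csq csq_arr canonical (select_csq csq_arr canonical)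


-- ===== LEMMAS AND PROOFS =====

-- A's db condition as a named predicate; it coincides pointwise with B's pvB_isdb
def pvIsDbA (canonical : List (String × String)) (csq : List (String × String)) : Bool :=
  (PySem.Dict.get? (PySem.Dict.mk canonical) (pvA_get csq "SYMBOL")).isSome
    && PySem.Dict.getD (PySem.Dict.mk canonical) (pvA_get csq "SYMBOL") "" == refseq_noversion (pvA_get csq "Feature")

theorem pv_isdb_eq (canonical csq : List (String × String)) :
    pvIsDbA canonical csq = pvB_isdb canonical csq := by
  unfold pvIsDbA pvB_isdb refseq_noversion pvA_get pvB_get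
  cases h : PySem.Dict.get? (PySem.Dict.mk canonical) (PySem.Dict.getD (PySem.Dict.mk csq) "SYMBOL" "")
  · simp
  · simp only [PySem.Dict.getD_eq_get?_getD] at h ⊢
    simp [h]

-- B's priority lookup as a pure function of the IMPACT string
def pvPrioStr (s : String) : Option Int :=
  if "HIGH" = s then some 0 else if "MODERATE" = s then some 1
  else if "LOW" = s then some 2 else if "MODIFIER" = s then some 3 else none

theorem pv_prio_eq_str (csq : List (String × String)) :
    pvB_prio csq = pvPrioStr (pvA_get csq "IMPACT") := by
  unfold pvB_prio pvPrioStr pvA_get pvB_get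
  simp only [PySem.Dict.get?_mk_cons, beq_iff_eq]
  split_ifs <;> rfl

-- order facts about Python's tuple '<'
theorem pv_lt_iff (a b : Int × Int) : pvB_lt a b = true ↔ (a.1 < b.1 ∨ (a.1 = b.1 ∧ a.2 < b.2)) := by
  simp [pvB_lt]

theorem pv_not_lt_iff (a b : Int × Int) : pvB_lt a b = false ↔ ¬ (a.1 < b.1 ∨ (a.1 = b.1 ∧ a.2 < b.2)) := by
  rw [Bool.eq_false_iff, ne_eq, pv_lt_iff]

theorem pv_lt_irrefl (a : Int × Int) : pvB_lt a a = false := by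
  rw [pv_not_lt_iff]; omega

theorem pv_lt_asymm {a b : Int × Int} (h : pvB_lt a b = true) : pvB_lt b a = false := by
  rw [pv_lt_iff] at h; rw [pv_not_lt_iff]; omega

theorem pv_le_antisymm {a b : Int × Int} (h1 : pvB_lt a b = false) (h2 : pvB_lt b a = false) : a = b := by
  rw [pv_not_lt_iff] at h1 h2
  rcases a with ⟨a1, a2⟩; rcases b with ⟨b1, b2⟩
  simp only [Prod.mk.injEq]
  simp only at h1 h2
  omega

theorem pv_le_trans {a b c : Int × Int} (h1 : pvB_lt b a = false) (h2 : pvB_lt c b = false) : pvB_lt c a = false := by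
  rw [pv_not_lt_iff] at h1 h2 ⊢; omega

theorem pv_lt_trans {a b c : Int × Int} (h1 : pvB_lt a b = true) (h2 : pvB_lt b c = true) : pvB_lt a c = true := by
  rw [pv_lt_iff] at h1 h2 ⊢; omega

-- the (priority, index) key of a qualifying entry
def pvKeyOf (e : Int × List (String × String)) : Int × Int := ((pvB_prio e.2).getD 0, e.1)

def pvQual (P : List (String × String) → Bool) (e : Int × List (String × String)) : Bool :=
  (pvB_prio e.2).isSome && P e.2

-- one component of B's loop as a fold
def pvFoldB (P : List (String × String) → Bool)
    (l : List (Int × List (String × String))) (acc : Option (Int × Int)) : Option (Int × Int) :=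
  l.foldl (fun acc e => if pvQual P e then pvB_upd acc (pvKeyOf e) else acc) acc

theorem pv_loopB_eq (canonical : List (String × String)) (l : List (Int × List (String × String)))
    (db vep prot : Option (Int × Int)) :
    pvB_loop canonical l db vep prot =
      (pvFoldB (pvB_isdb canonical) l db,
       pvFoldB (fun c => pvB_get c "CANONICAL" == "YES") l vep,
       pvFoldB (fun c => pvB_get c "BIOTYPE" == "protein_coding") l prot) := by
  induction l generalizing db vep prot with
  | nil => simp [pvB_loop, pvFoldB]
  | cons e rest ih =>
    obtain ⟨idx, csq⟩ := e
    rw [pvB_loop]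
    cases h : pvB_prio csq with
    | none => simp [ih, pvFoldB, pvQual, h]
    | some p => simp [ih, pvFoldB, pvQual, pvKeyOf, h]

theorem pv_upd_ne_none (acc : Option (Int × Int)) (k : Int × Int) : pvB_upd acc k ≠ none := by
  cases acc with
  | none => simp [pvB_upd]
  | some b => simp only [pvB_upd]; split <;> simp

theorem pv_foldB_none_iff (P : List (String × String) → Bool)
    (l : List (Int × List (String × String))) (acc : Option (Int × Int)) :
    pvFoldB P l acc = none ↔ acc = none ∧ ∀ e ∈ l, pvQual P e = false := by
  induction l generalizing acc with
  | nil => simp [pvFoldB]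
  | cons e rest ih =>
    rw [pvFoldB, List.foldl_cons, ← pvFoldB]
    by_cases hq : pvQual P e = true
    · rw [if_pos hq, ih]
      constructor
      · rintro ⟨h, -⟩; exact absurd h (pv_upd_ne_none _ _)
      · rintro ⟨-, h⟩; exact absurd (h e (by simp)) (by simp [hq])
    · rw [if_neg hq, ih]
      simp only [Bool.not_eq_true] at hq
      constructor
      · rintro ⟨h1, h2⟩
        refine ⟨h1, ?_⟩
        intro x hx
        rcases List.mem_cons.mp hx with hx | hx
        · exact hx ▸ hq
        · exact h2 x hx
      · rintro ⟨h1, h2⟩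
        exact ⟨h1, fun x hx => h2 x (List.mem_cons_of_mem _ hx)⟩

theorem pv_foldB_some (P : List (String × String) → Bool)
    (l : List (Int × List (String × String))) (acc : Option (Int × Int)) (k : Int × Int)
    (h : pvFoldB P l acc = some k) :
    ((∃ e ∈ l, pvQual P e = true ∧ pvKeyOf e = k) ∨ acc = some k) ∧
    (∀ e ∈ l, pvQual P e = true → pvB_lt (pvKeyOf e) k = false) ∧
    (∀ a, acc = some a → pvB_lt a k = false) := by
  induction l generalizing acc with
  | nil =>
    simp [pvFoldB] at h
    exact ⟨Or.inr h, by simp, by intro a ha; rw [h] at ha; cases ha; exact pv_lt_irrefl _⟩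
  | cons e rest ih =>
    rw [pvFoldB, List.foldl_cons, ← pvFoldB] at h
    by_cases hq : pvQual P e = true
    · rw [if_pos hq] at h
      obtain ⟨hex, hmin, hacc⟩ := ih _ h
      have hkey : pvB_lt (pvKeyOf e) k = false := by
        cases acc with
        | none =>
          exact hacc _ rfl
        | some a =>
          by_cases hlt : pvB_lt (pvKeyOf e) a = true
          · exact hacc _ (by simp [pvB_upd, hlt])
          · have h1 : pvB_lt a k = false := hacc a (by simp [pvB_upd, hlt])
            exact pv_le_trans h1 (by simpa using hlt)
      refine ⟨?_, ?_, ?_⟩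
      · rcases hex with hex | hex
        · obtain ⟨e0, he0, hq0, hk0⟩ := hex
          exact Or.inl ⟨e0, List.mem_cons_of_mem _ he0, hq0, hk0⟩
        · cases acc with
          | none =>
            simp [pvB_upd] at hex
            exact Or.inl ⟨e, by simp, hq, hex⟩
          | some a =>
            by_cases hlt : pvB_lt (pvKeyOf e) a = true
            · simp [pvB_upd, hlt] at hex
              exact Or.inl ⟨e, by simp, hq, hex⟩
            · simp [pvB_upd, hlt] at hex
              exact Or.inr (by rw [hex])
      · intro x hx hqx
        rcases List.mem_cons.mp hx with hx | hx
        · exact hx ▸ hkey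
        · exact hmin x hx hqx
      · intro a ha
        subst ha
        by_cases hlt : pvB_lt (pvKeyOf e) a = true
        · have h1 : pvB_lt (pvKeyOf e) k = false := hkey
          by_contra hc
          simp only [Bool.not_eq_false] at hc
          have := pv_lt_trans hlt hc
          rw [this] at h1; cases h1
        · exact hacc a (by simp [pvB_upd, hlt])
    · rw [if_neg hq] at h
      obtain ⟨hex, hmin, hacc⟩ := ih _ h
      simp only [Bool.not_eq_true] at hq
      refine ⟨?_, ?_, hacc⟩
      · rcases hex with ⟨e0, he0, hq0, hk0⟩ | hex
        · exact Or.inl ⟨e0, List.mem_cons_of_mem _ he0, hq0, hk0⟩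
        · exact Or.inr hex
      · intro x hx hqx
        rcases List.mem_cons.mp hx with hx | hx
        · subst hx; rw [hq] at hqx; cases hqx
        · exact hmin x hx hqx

-- ===== A-side normalization =====

-- A's inner scan with the impact test already discharged by a filter
def pvScan1 (canonical : List (String × String)) :
    List (Int × List (String × String)) → Int → Int → Option Int × Int × Int
  | [], v, p => (none, v, p)
  | (idx, csq) :: rest, v, p =>
    if pvIsDbA canonical csq then (some idx, v, p)
    else pvScan1 canonical rest
      (if pvA_get csq "CANONICAL" == "YES" && v == -1 then idx else v)
      (if p == -1 && pvA_get csq "BIOTYPE" == "protein_coding" && p == -1 then idx else p)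

theorem pv_scan_eq_filter (canonical : List (String × String)) (impact : String)
    (l : List (Int × List (String × String))) (v p : Int) :
    pvA_scan canonical impact l v p =
      pvScan1 canonical (l.filter (fun e => pvA_get e.2 "IMPACT" == impact)) v p := by
  induction l generalizing v p with
  | nil => rfl
  | cons e rest ih =>
    obtain ⟨idx, csq⟩ := e
    by_cases h : (pvA_get csq "IMPACT" == impact) = true
    · rw [pvA_scan, if_pos h]
      have hf : List.filter (fun e => pvA_get e.2 "IMPACT" == impact) ((idx, csq) :: rest)
          = (idx, csq) :: List.filter (fun e => pvA_get e.2 "IMPACT" == impact) rest := by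
        simp [h]
      rw [hf, pvScan1]
      unfold pvIsDbA
      split
      · rfl
      · exact ih _ _
    · rw [pvA_scan, if_neg h]
      have hf : List.filter (fun e => pvA_get e.2 "IMPACT" == impact) ((idx, csq) :: rest)
          = List.filter (fun e => pvA_get e.2 "IMPACT" == impact) rest := by
        simp [h]
      rw [hf]
      exact ih _ _

theorem pv_scan1_append (canonical : List (String × String))
    (l1 l2 : List (Int × List (String × String))) (v p : Int) :
    pvScan1 canonical (l1 ++ l2) v p =
      match pvScan1 canonical l1 v p with
      | (some i, v', p') => (some i, v', p')
      | (none, v', p') => pvScan1 canonical l2 v' p' := by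
  induction l1 generalizing v p with
  | nil => rfl
  | cons e rest ih =>
    obtain ⟨idx, csq⟩ := e
    rw [List.cons_append, pvScan1, pvScan1]
    split
    · rfl
    · exact ih _ _

theorem pv_loopA_eq (canonical : List (String × String)) (l : List (Int × List (String × String)))
    (impacts : List String) (v p : Int) :
    pvA_loop canonical l impacts v p =
      pvScan1 canonical
        (impacts.flatMap (fun imp => l.filter (fun e => pvA_get e.2 "IMPACT" == imp))) v p := by
  induction impacts generalizing v p with
  | nil => rfl
  | cons imp rest ih =>
    rw [pvA_loop, List.flatMap_cons, pv_scan1_append, pv_scan_eq_filter]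
    cases hs : pvScan1 canonical (l.filter (fun e => pvA_get e.2 "IMPACT" == imp)) v p with
    | mk o vp =>
      obtain ⟨v', p'⟩ := vp
      cases o <;> simp [ih]

-- first component of the scan: the first db match
theorem pv_scan1_fst (canonical : List (String × String))
    (l : List (Int × List (String × String))) (v p : Int) :
    (pvScan1 canonical l v p).1 = (l.find? (fun e => pvIsDbA canonical e.2)).map (·.1) := by
  induction l generalizing v p with
  | nil => rfl
  | cons e rest ih =>
    obtain ⟨idx, csq⟩ := e
    rw [pvScan1]
    by_cases h : pvIsDbA canonical csq = true
    · rw [if_pos h, List.find?_cons_of_pos (by simpa using h)]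
      rfl
    · rw [if_neg h, List.find?_cons_of_neg (by simpa using h)]
      exact ih _ _

-- second component (vep_canonical) when no db match occurs
theorem pv_scan1_vep (canonical : List (String × String))
    (l : List (Int × List (String × String))) (v p : Int)
    (hdb : ∀ e ∈ l, pvIsDbA canonical e.2 = false) (hnn : ∀ e ∈ l, 0 ≤ e.1) :
    (pvScan1 canonical l v p).2.1 =
      if v = -1 then
        (match l.find? (fun e => pvA_get e.2 "CANONICAL" == "YES") with
         | some e => e.1 | none => -1)
      else v := by
  induction l generalizing v p with
  | nil => rcases eq_or_ne v (-1) with hv | hv <;> simp [pvScan1, hv]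
  | cons e rest ih =>
    obtain ⟨idx, csq⟩ := e
    have hidx : (0 : Int) ≤ idx := hnn (idx, csq) (by simp)
    rw [pvScan1, if_neg (by simpa using hdb _ (List.mem_cons_self ..))]
    rw [ih _ _ (fun x hx => hdb x (List.mem_cons_of_mem _ hx)) (fun x hx => hnn x (List.mem_cons_of_mem _ hx))]
    by_cases hv : v = -1
    · by_cases hy : (pvA_get csq "CANONICAL" == "YES") = true
      · rw [if_pos (show (pvA_get csq "CANONICAL" == "YES" && v == -1) = true by simp [hy, hv])]
        rw [if_neg (show ¬ idx = -1 by omega), if_pos hv,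
            List.find?_cons_of_pos (by simpa using hy)]
      · rw [if_neg (show ¬ (pvA_get csq "CANONICAL" == "YES" && v == -1) = true by simp [hy])]
        rw [if_pos hv, if_pos hv, List.find?_cons_of_neg (by simpa using hy)]
    · rw [if_neg (show ¬ (pvA_get csq "CANONICAL" == "YES" && v == -1) = true by simp [hv])]
      rw [if_neg hv, if_neg hv]

-- third component (first_protcoding) when no db match occurs
theorem pv_scan1_prot (canonical : List (String × String))
    (l : List (Int × List (String × String))) (v p : Int)
    (hdb : ∀ e ∈ l, pvIsDbA canonical e.2 = false) (hnn : ∀ e ∈ l, 0 ≤ e.1) :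
    (pvScan1 canonical l v p).2.2 =
      if p = -1 then
        (match l.find? (fun e => pvA_get e.2 "BIOTYPE" == "protein_coding") with
         | some e => e.1 | none => -1)
      else p := by
  induction l generalizing v p with
  | nil => rcases eq_or_ne p (-1) with hp | hp <;> simp [pvScan1, hp]
  | cons e rest ih =>
    obtain ⟨idx, csq⟩ := e
    have hidx : (0 : Int) ≤ idx := hnn (idx, csq) (by simp)
    rw [pvScan1, if_neg (by simpa using hdb _ (List.mem_cons_self ..))]
    rw [ih _ _ (fun x hx => hdb x (List.mem_cons_of_mem _ hx)) (fun x hx => hnn x (List.mem_cons_of_mem _ hx))]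
    by_cases hp : p = -1
    · by_cases hy : (pvA_get csq "BIOTYPE" == "protein_coding") = true
      · rw [if_pos (show (p == -1 && pvA_get csq "BIOTYPE" == "protein_coding" && p == -1) = true by simp [hy, hp])]
        rw [if_neg (show ¬ idx = -1 by omega), if_pos hp,
            List.find?_cons_of_pos (by simpa using hy)]
      · rw [if_neg (show ¬ (p == -1 && pvA_get csq "BIOTYPE" == "protein_coding" && p == -1) = true by simp [hy])]
        rw [if_pos hp, if_pos hp, List.find?_cons_of_neg (by simpa using hy)]
    · rw [if_neg (show ¬ (p == -1 && pvA_get csq "BIOTYPE" == "protein_coding" && p == -1) = true by simp [hp])]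
      rw [if_neg hp, if_neg hp]

-- ===== bridging the two traversal orders =====

theorem pv_prio_of_impact (csq : List (String × String)) (imp : String) (j : Int)
    (hj : pvPrioStr imp = some j) (h : (pvA_get csq "IMPACT" == imp) = true) :
    pvB_prio csq = some j := by
  rw [pv_prio_eq_str]
  rw [beq_iff_eq] at h
  rw [h, hj]

theorem pv_mem_L (enumd : List (Int × List (String × String))) (e : Int × List (String × String)) :
    e ∈ (["HIGH", "MODERATE", "LOW", "MODIFIER"] : List String).flatMap
        (fun imp => enumd.filter (fun e => pvA_get e.2 "IMPACT" == imp)) ↔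
      e ∈ enumd ∧ (pvB_prio e.2).isSome = true := by
  simp only [List.flatMap_cons, List.flatMap_nil, List.append_nil, List.mem_append,
    List.mem_filter, pv_prio_eq_str, beq_iff_eq]
  unfold pvPrioStr
  split_ifs with h1 h2 h3 h4 <;> simp_all [eq_comm] <;> tauto

theorem pv_block_key (enumd : List (Int × List (String × String))) (imp : String) (j : Int)
    (hj : pvPrioStr imp = some j) (e : Int × List (String × String))
    (he : e ∈ enumd.filter (fun e => pvA_get e.2 "IMPACT" == imp)) :
    pvKeyOf e = (j, e.1) := by
  have h := (List.mem_filter.mp he).2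
  simp only [pvKeyOf, pv_prio_of_impact e.2 imp j hj h, Option.getD_some]

theorem pv_block_pairwise (csq_arr : List (List (String × String))) (imp : String) (j : Int)
    (hj : pvPrioStr imp = some j) :
    ((PySem.List.enumerate csq_arr).filter (fun e => pvA_get e.2 "IMPACT" == imp)).Pairwise
      (fun a b => pvB_lt (pvKeyOf a) (pvKeyOf b) = true) := by
  have h : ((PySem.List.enumerate csq_arr).filter
      (fun e => pvA_get e.2 "IMPACT" == imp)).Pairwise (fun a b => a.1 < b.1) :=
    (PySem.List.pairwise_lt_enumerate csq_arr 0).filter _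
  refine h.imp_of_mem ?_
  intro a b ha hb hr
  rw [pv_block_key _ imp j hj a ha, pv_block_key _ imp j hj b hb, pv_lt_iff]
  exact Or.inr ⟨rfl, hr⟩

theorem pv_cross (csq_arr : List (List (String × String))) (impi impj : String) (ji jj : Int)
    (hji : pvPrioStr impi = some ji) (hjj : pvPrioStr impj = some jj) (hlt : ji < jj) :
    ∀ a ∈ (PySem.List.enumerate csq_arr).filter (fun e => pvA_get e.2 "IMPACT" == impi),
    ∀ b ∈ (PySem.List.enumerate csq_arr).filter (fun e => pvA_get e.2 "IMPACT" == impj),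
      pvB_lt (pvKeyOf a) (pvKeyOf b) = true := by
  intro a ha b hb
  rw [pv_block_key _ impi ji hji a ha, pv_block_key _ impj jj hjj b hb, pv_lt_iff]
  exact Or.inl hlt

theorem pv_sorted_L (csq_arr : List (List (String × String))) :
    ((["HIGH", "MODERATE", "LOW", "MODIFIER"] : List String).flatMap
        (fun imp => (PySem.List.enumerate csq_arr).filter
          (fun e => pvA_get e.2 "IMPACT" == imp))).Pairwise
      (fun a b => pvB_lt (pvKeyOf a) (pvKeyOf b) = true) := by
  simp only [List.flatMap_cons, List.flatMap_nil, List.append_nil]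
  rw [List.pairwise_append]
  refine ⟨pv_block_pairwise csq_arr "HIGH" 0 rfl, ?_, ?_⟩
  · rw [List.pairwise_append]
    refine ⟨pv_block_pairwise csq_arr "MODERATE" 1 rfl, ?_, ?_⟩
    · rw [List.pairwise_append]
      refine ⟨pv_block_pairwise csq_arr "LOW" 2 rfl, pv_block_pairwise csq_arr "MODIFIER" 3 rfl, ?_⟩
      · exact pv_cross csq_arr "LOW" "MODIFIER" 2 3 rfl rfl (by norm_num)
    · intro a ha b hb
      rcases List.mem_append.mp hb with hb | hb
      · exact pv_cross csq_arr "MODERATE" "LOW" 1 2 rfl rfl (by norm_num) a ha b hb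
      · exact pv_cross csq_arr "MODERATE" "MODIFIER" 1 3 rfl rfl (by norm_num) a ha b hb
  · intro a ha b hb
    rcases List.mem_append.mp hb with hb | hb
    · exact pv_cross csq_arr "HIGH" "MODERATE" 0 1 rfl rfl (by norm_num) a ha b hb
    · rcases List.mem_append.mp hb with hb | hb
      · exact pv_cross csq_arr "HIGH" "LOW" 0 2 rfl rfl (by norm_num) a ha b hb
      · exact pv_cross csq_arr "HIGH" "MODIFIER" 0 3 rfl rfl (by norm_num) a ha b hb

theorem pv_find_min {P : (Int × List (String × String)) → Bool}
    {L : List (Int × List (String × String))}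
    (hp : L.Pairwise (fun a b => pvB_lt (pvKeyOf a) (pvKeyOf b) = true))
    {e : Int × List (String × String)} (h : L.find? P = some e) :
    e ∈ L ∧ P e = true ∧ ∀ e' ∈ L, P e' = true → pvB_lt (pvKeyOf e') (pvKeyOf e) = false := by
  induction L with
  | nil => simp at h
  | cons a rest ih =>
    obtain ⟨ha, hrest⟩ := List.pairwise_cons.mp hp
    by_cases hPa : P a = true
    · rw [List.find?_cons_of_pos hPa] at h
      injection h with h
      subst h
      refine ⟨by simp, hPa, ?_⟩
      intro x hx hPx
      rcases List.mem_cons.mp hx with rfl | hx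
      · exact pv_lt_irrefl _
      · exact pv_lt_asymm (ha x hx)
    · rw [List.find?_cons_of_neg (by simpa using hPa)] at h
      obtain ⟨hmem, hPe, hmin⟩ := ih hrest h
      refine ⟨List.mem_cons_of_mem _ hmem, hPe, ?_⟩
      intro x hx hPx
      rcases List.mem_cons.mp hx with rfl | hx
      · exact absurd hPx hPa
      · exact hmin x hx hPx

theorem pv_bridge (enumd L : List (Int × List (String × String)))
    (P : List (String × String) → Bool)
    (hmem : ∀ e, e ∈ L ↔ e ∈ enumd ∧ (pvB_prio e.2).isSome = true)
    (hsort : L.Pairwise (fun a b => pvB_lt (pvKeyOf a) (pvKeyOf b) = true)) :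
    (L.find? (fun e => P e.2)).map pvKeyOf = pvFoldB P enumd none := by
  cases hf : L.find? (fun e => P e.2) with
  | none =>
    have hno := List.find?_eq_none.mp hf
    symm
    rw [Option.map_none]
    rw [pv_foldB_none_iff]
    refine ⟨rfl, fun e he => ?_⟩
    by_cases hs : (pvB_prio e.2).isSome = true
    · have heL : e ∈ L := (hmem e).mpr ⟨he, hs⟩
      have hP : P e.2 = false := by simpa using hno e heL
      simp [pvQual, hP]
    · have hs' : (pvB_prio e.2).isSome = false := by simpa using hs
      simp [pvQual, hs']
  | some e =>
    obtain ⟨heL, hPe, hminA⟩ := pv_find_min hsort hf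
    obtain ⟨heE, hsome⟩ := (hmem e).mp heL
    cases hb : pvFoldB P enumd none with
    | none =>
      exfalso
      have := ((pv_foldB_none_iff P enumd none).mp hb).2 e heE
      simp [pvQual, hsome, hPe] at this
    | some k =>
      obtain ⟨hex, hminB, -⟩ := pv_foldB_some P enumd none k hb
      rcases hex with ⟨e0, he0, hq0, hk0⟩ | hacc
      · rw [pvQual, Bool.and_eq_true] at hq0
        have he0L : e0 ∈ L := (hmem e0).mpr ⟨he0, hq0.1⟩
        have h1 : pvB_lt (pvKeyOf e0) (pvKeyOf e) = false := hminA e0 he0L hq0.2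
        have h2 : pvB_lt (pvKeyOf e) k = false := hminB e heE (by simp [pvQual, hsome, hPe])
        rw [hk0] at h1
        rw [Option.map_some]
        rw [pv_le_antisymm h2 h1]
      · simp at hacc

theorem pv_main (csq_arr : List (List (String × String))) (canonical : List (String × String)) :
    select_csq csq_arr canonical = select_csq_alt csq_arr canonical := by
  have hget : pvB_get = pvA_get := rfl
  have hpredA : (fun e : Int × List (String × String) => pvIsDbA canonical e.2)
      = (fun e => pvB_isdb canonical e.2) := funext fun e => pv_isdb_eq canonical e.2
  unfold select_csq select_csq_alt
  rw [pv_loopA_eq, pv_loopB_eq]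
  simp only [hget]
  have hmem := pv_mem_L (PySem.List.enumerate csq_arr)
  have hsort := pv_sorted_L csq_arr
  have hdbP := pv_bridge _ _ (pvB_isdb canonical) hmem hsort
  have hvepP := pv_bridge _ _ (fun c => pvA_get c "CANONICAL" == "YES") hmem hsort
  have hprotP := pv_bridge _ _ (fun c => pvA_get c "BIOTYPE" == "protein_coding") hmem hsort
  dsimp only [] at hdbP hvepP hprotP
  have hnnE : ∀ e ∈ PySem.List.enumerate csq_arr, (0 : Int) ≤ e.1 := by
    intro e he
    rw [PySem.List.mem_enumerate_iff] at he
    obtain ⟨k, hk, rfl⟩ := he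
    simp
  have hnn : ∀ e ∈ (["HIGH", "MODERATE", "LOW", "MODIFIER"] : List String).flatMap
      (fun imp => (PySem.List.enumerate csq_arr).filter (fun e => pvA_get e.2 "IMPACT" == imp)),
      (0 : Int) ≤ e.1 := fun e he => hnnE e ((hmem e).mp he).1
  have h1 := pv_scan1_fst canonical ((["HIGH", "MODERATE", "LOW", "MODIFIER"] : List String).flatMap
      (fun imp => (PySem.List.enumerate csq_arr).filter (fun e => pvA_get e.2 "IMPACT" == imp))) (-1) (-1)
  rw [hpredA] at h1
  cases hf : List.find? (fun e => pvB_isdb canonical e.2)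
      ((["HIGH", "MODERATE", "LOW", "MODIFIER"] : List String).flatMap
        (fun imp => (PySem.List.enumerate csq_arr).filter (fun e => pvA_get e.2 "IMPACT" == imp))) with
  | some e =>
    rw [hf] at h1 hdbP
    simp only [Option.map_some] at hdbP
    rcases hS : pvScan1 canonical _ (-1) (-1) with ⟨o, vv, pp⟩
    rw [hS] at h1
    simp only [Option.map_some] at h1
    subst h1
    rw [← hdbP]
    simp [pvKeyOf]
  | none =>
    rw [hf] at h1 hdbP
    simp only [Option.map_none] at hdbP h1
    have hAll : ∀ x ∈ (["HIGH", "MODERATE", "LOW", "MODIFIER"] : List String).flatMap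
        (fun imp => (PySem.List.enumerate csq_arr).filter (fun e => pvA_get e.2 "IMPACT" == imp)),
        pvIsDbA canonical x.2 = false := by
      intro x hx
      have := List.find?_eq_none.mp hf x hx
      simpa [pv_isdb_eq] using this
    have h2 := pv_scan1_vep canonical _ (-1) (-1) hAll hnn
    have h3 := pv_scan1_prot canonical _ (-1) (-1) hAll hnn
    rcases hS : pvScan1 canonical _ (-1) (-1) with ⟨o, vv, pp⟩
    rw [hS] at h1 h2 h3
    simp only at h1 h2 h3
    subst h1
    simp only [if_true] at h2 h3
    rw [← hdbP]
    revert h2 hvepP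
    cases hfv : List.find? (fun e => pvA_get e.2 "CANONICAL" == "YES")
        ((["HIGH", "MODERATE", "LOW", "MODIFIER"] : List String).flatMap
          (fun imp => (PySem.List.enumerate csq_arr).filter (fun e => pvA_get e.2 "IMPACT" == imp))) with
    | some ev =>
      intro hvepP h2
      subst h2
      simp only [Option.map_some] at hvepP
      rw [← hvepP]
      have hev : (0 : Int) ≤ ev.1 := hnn ev (List.mem_of_find?_eq_some hfv)
      dsimp only
      rw [if_pos (show ev.1 ≥ 0 from hev)]
      simp [pvKeyOf]
    | none =>
      intro hvepP h2
      subst h2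
      simp only [Option.map_none] at hvepP
      rw [← hvepP]
      revert h3 hprotP
      cases hfp : List.find? (fun e => pvA_get e.2 "BIOTYPE" == "protein_coding")
          ((["HIGH", "MODERATE", "LOW", "MODIFIER"] : List String).flatMap
            (fun imp => (PySem.List.enumerate csq_arr).filter (fun e => pvA_get e.2 "IMPACT" == imp))) with
      | some ep =>
        intro hprotP h3
        subst h3
        simp only [Option.map_some] at hprotP
        rw [← hprotP]
        have hep : (0 : Int) ≤ ep.1 := hnn ep (List.mem_of_find?_eq_some hfp)
        dsimp only
        rw [if_neg (by omega : ¬ (-1 : Int) ≥ 0), if_pos (show ep.1 ≥ 0 from hep)]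
        simp [pvKeyOf]
      | none =>
        intro hprotP h3
        subst h3
        simp only [Option.map_none] at hprotP
        rw [← hprotP]
        dsimp only
        rw [if_neg (by omega : ¬ (-1 : Int) ≥ 0), if_neg (by omega : ¬ (-1 : Int) ≥ 0)]

-- ===== VERDICT (by name: the statement is the Claim_ definition above) =====
theorem select_csq_spec : Claim_equal_select_csq := by
  intro csq_arr canonical _ _
  unfold Spec_select_csq
  exact pv_main csq_arr canonical
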